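-- pv_equiv track=rewrite | github.com/CharlesArnal/Homology_Explorer | utilities.py | triang_relevant_indices
-- ===== SOURCE A (Python) =====
-- def triang_relevant_indices(triang):
-- 	indices = []
-- 	for simplex in triang:
-- 		for pt_index in simplex:
-- 			if pt_index not in indices:
-- 				indices.append(pt_index)
-- 	indices.sort()
-- 	return indices
-- ===== SOURCE B (Python) =====
-- def triang_relevant_indices(triang):
--     flat = [pt_index for simplex in triang for pt_index in simplex]
--     flat.sort()
--     result = []
--     for x in flat:
--         if not result or result[-1] != x:
--             result.append(x)
--     return result
-- ===== Notes on version B (the rewrite author's own statement) =====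
-- stated objective: faster
-- what changed: Replaces the quadratic membership-scan dedup (pt_index not in indices) with flatten, one sort, and a single linear adjacent-duplicate pass.
import Mathlib
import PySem

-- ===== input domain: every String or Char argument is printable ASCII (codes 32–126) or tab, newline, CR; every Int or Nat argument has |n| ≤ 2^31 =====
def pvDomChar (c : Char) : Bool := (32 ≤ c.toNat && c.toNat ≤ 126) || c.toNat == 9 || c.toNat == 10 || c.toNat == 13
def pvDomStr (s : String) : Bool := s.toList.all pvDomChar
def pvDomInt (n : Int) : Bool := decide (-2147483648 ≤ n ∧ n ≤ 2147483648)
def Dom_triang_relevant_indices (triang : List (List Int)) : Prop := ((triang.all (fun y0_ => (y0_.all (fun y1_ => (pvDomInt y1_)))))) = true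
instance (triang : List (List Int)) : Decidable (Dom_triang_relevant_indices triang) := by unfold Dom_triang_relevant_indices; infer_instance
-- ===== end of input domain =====

-- B replaces A's quadratic membership-scan dedup by flatten + one sort + a linear adjacent-duplicate pass (objective: faster).

-- ===== PORT A =====
def triang_relevant_indices (triang : List (List Int)) : List Int :=
  let indices :=
    triang.foldl (fun indices simplex =>
      simplex.foldl (fun indices pt_index =>
        if pt_index ∈ indices then indices else indices ++ [pt_index]) indices) []
  PySem.List.sorted indices (fun x => x) false

-- ===== PORT B =====
def triang_relevant_indices_alt (triang : List (List Int)) : List Int :=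
  let flat := triang.flatMap (fun simplex => simplex)
  let sortedFlat := PySem.List.sorted flat (fun x => x) false
  sortedFlat.foldl (fun result x =>
    if result = [] ∨ result.getLast? ≠ some x then result ++ [x] else result) []

-- ===== PRECONDITION & SPEC =====
def Spec_triang_relevant_indices (triang : List (List Int)) (out : List Int) : Prop := out = triang_relevant_indices_alt triang
instance (triang : List (List Int)) (out : List Int) : Decidable (Spec_triang_relevant_indices triang out) := by unfold Spec_triang_relevant_indices; infer_instance

-- ===== CLAIM (what is proved, stated in full; the proofs are below) =====
def Claim_equal_triang_relevant_indices : Prop := ∀ (triang : List (List Int)), Dom_triang_relevant_indices triang → Spec_triang_relevant_indices triang (triang_relevant_indices triang)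

-- ===== LEMMAS AND PROOFS =====

-- the adjacent-dedup pass of B, written structurally; `a` is the last element already kept
def pvAdjFrom (a : Int) : List Int → List Int
  | [] => []
  | x :: t => if x = a then pvAdjFrom a t else x :: pvAdjFrom x t

theorem pvFoldl_adj (s : List Int) : ∀ (acc : List Int) (a : Int), acc.getLast? = some a →
    s.foldl (fun result x =>
      if result = [] ∨ result.getLast? ≠ some x then result ++ [x] else result) acc
    = acc ++ pvAdjFrom a s := by
  induction s with
  | nil => intro acc a _; simp [pvAdjFrom]
  | cons x t ih =>
    intro acc a h
    have hne : acc ≠ [] := by intro hc; simp [hc] at h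
    by_cases hxa : x = a
    · subst hxa
      have hcond : (if acc = [] ∨ acc.getLast? ≠ some x then acc ++ [x] else acc) = acc := by
        simp [hne, h]
      rw [List.foldl_cons, hcond]
      have hadj : pvAdjFrom x (x :: t) = pvAdjFrom x t := by simp [pvAdjFrom]
      rw [hadj]
      exact ih acc x h
    · have hgl : acc.getLast? ≠ some x := by
        rw [h]; intro hc; exact hxa (Option.some.inj hc).symm
      rw [List.foldl_cons, if_pos (Or.inr hgl),
        ih (acc ++ [x]) x (List.getLast?_concat)]
      have hadj : pvAdjFrom a (x :: t) = x :: pvAdjFrom x t := by simp [pvAdjFrom, hxa]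
      rw [hadj, List.append_assoc]
      rfl

theorem pvAdj_spec (s : List Int) : ∀ (a : Int), (a :: s).Pairwise (· ≤ ·) →
    (a :: pvAdjFrom a s).Pairwise (· < ·) ∧ (∀ x, x ∈ a :: pvAdjFrom a s ↔ x ∈ a :: s) := by
  induction s with
  | nil => intro a _; simp [pvAdjFrom]
  | cons y t ih =>
    intro a hp
    rw [List.pairwise_cons] at hp
    obtain ⟨hay, hpt⟩ := hp
    by_cases hya : y = a
    · subst hya
      obtain ⟨hpw, hmem⟩ := ih y hpt
      have hadj : pvAdjFrom y (y :: t) = pvAdjFrom y t := by simp [pvAdjFrom]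
      rw [hadj]
      refine ⟨hpw, fun x => ?_⟩
      have := hmem x
      simp only [List.mem_cons] at *
      tauto
    · have hlt : a < y := lt_of_le_of_ne (hay y (List.mem_cons_self)) (Ne.symm hya)
      obtain ⟨hpw, hmem⟩ := ih y hpt
      have hadj : pvAdjFrom a (y :: t) = y :: pvAdjFrom y t := by simp [pvAdjFrom, hya]
      rw [hadj]
      constructor
      · rw [List.pairwise_cons]
        refine ⟨fun b hb => ?_, hpw⟩
        have hb' := (hmem b).mp hb
        rcases List.mem_cons.mp hb' with h | h
        · exact h ▸ hlt
        · exact lt_of_lt_of_le hlt (List.rel_of_pairwise_cons hpt h)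
      · intro x
        have := hmem x
        simp only [List.mem_cons] at *
        tauto

theorem pvDedupFoldl_spec (s : List Int) : ∀ (acc : List Int), acc.Nodup →
    (s.foldl (fun indices pt_index =>
      if pt_index ∈ indices then indices else indices ++ [pt_index]) acc).Nodup ∧
    (∀ x, x ∈ s.foldl (fun indices pt_index =>
      if pt_index ∈ indices then indices else indices ++ [pt_index]) acc ↔ x ∈ acc ∨ x ∈ s) := by
  induction s with
  | nil => intro acc h; simpa using h
  | cons y t ih =>
    intro acc h
    by_cases hy : y ∈ acc
    · simp only [List.foldl_cons, if_pos hy]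
      obtain ⟨h1, h2⟩ := ih acc h
      refine ⟨h1, fun x => ?_⟩
      have := h2 x
      simp only [List.mem_cons] at *
      constructor
      · tauto
      · rintro (h | rfl | h) <;> tauto
    · simp only [List.foldl_cons, if_neg hy]
      have hnd : (acc ++ [y]).Nodup := by
        rw [List.nodup_append]
        exact ⟨h, List.nodup_singleton y, by simp; exact fun a ha hc => hy (hc ▸ ha)⟩
      obtain ⟨h1, h2⟩ := ih (acc ++ [y]) hnd
      refine ⟨h1, fun x => ?_⟩
      have := h2 x
      simp only [List.mem_append, List.mem_cons] at *
      tauto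

theorem pvMain' (flat : List Int) :
    PySem.List.sorted (flat.foldl (fun indices pt_index =>
        if pt_index ∈ indices then indices else indices ++ [pt_index]) []) (fun x => x) false
    = (PySem.List.sorted flat (fun x => x) false).foldl (fun result x =>
        if result = [] ∨ result.getLast? ≠ some x then result ++ [x] else result) [] := by
  obtain ⟨hLnd, hLmem⟩ := pvDedupFoldl_spec flat [] List.nodup_nil
  rcases hsc : PySem.List.sorted flat (fun x => x) false with _ | ⟨a, t⟩
  · have hf : flat = [] := (PySem.List.sorted_eq_nil_iff _ _ _).mp hsc
    subst hf; rfl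
  · have h0 : (if ([] : List Int) = [] ∨ ([] : List Int).getLast? ≠ some a
        then ([] : List Int) ++ [a] else []) = [a] := by simp
    rw [List.foldl_cons, h0, pvFoldl_adj t [a] a (by simp)]
    have hpw : (a :: t).Pairwise (· ≤ ·) := by
      have := PySem.List.sorted_pairwise (xs := flat) (key := fun x : Int => x)
      rw [hsc] at this
      exact this
    obtain ⟨hBpw, hBmem⟩ := pvAdj_spec t a hpw
    have hmemflat : ∀ x, x ∈ (a :: t) ↔ x ∈ flat := by
      intro x
      have := PySem.List.mem_sorted (x := x) (xs := flat) (key := fun x : Int => x) (rev := false)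
      rw [hsc] at this
      exact this
    have : ([a] ++ pvAdjFrom a t) = a :: pvAdjFrom a t := rfl
    rw [this]
    apply PySem.List.sorted_eq_of_perm_of_pairwise_lt
    · rw [List.perm_ext_iff_of_nodup (hBpw.imp ne_of_lt) hLnd]
      intro x
      rw [hBmem x, hmemflat x, hLmem x]
      simp
    · simpa using hBpw

theorem pvMain (triang : List (List Int)) :
    triang_relevant_indices triang = triang_relevant_indices_alt triang := by
  simp only [triang_relevant_indices, triang_relevant_indices_alt]
  rw [← List.foldl_flatMap (f := fun simplex : List Int => simplex)]
  exact pvMain' (triang.flatMap (fun simplex => simplex))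

-- ===== VERDICT (by name: the statement is the Claim_ definition above) =====
theorem triang_relevant_indices_spec : Claim_equal_triang_relevant_indices := by
  intro triang _
  unfold Spec_triang_relevant_indices
  exact pvMain triang
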